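-- pv_equiv track=rewrite | github.com/benquick123/code-profiling | code/batch-2/vse-naloge-brez-testov/DN7-M-095.py | polje_v_mine
-- ===== SOURCE A (Python) =====
-- def polje_v_mine(polje):
--     """
--     Vrni koordinate min v podanem polju.
--
--     Niz polje opisuje polje tako, da so vodoravne "vrstice" polja ločene s
--     presledki. Prosta polja so označena z znako `.`, mine z `X`.
--
--     Args:
--         polje (str): polje
--
--     Returns:
--         mine (set of tuple of int): koordinate min
--         s (int): širina polja
--         v (int): višina polja.
--     """
--     mine = set()
--     vrstice = polje.split(" ")
--     count = 0
--     for el in vrstice: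
--         i = 0
--         while i < len(el):
--             if el[i] == "X":
--                 mine.add((i, count))
--             i += 1
--         count += 1
--     return (mine, len(el), count)
-- ===== SOURCE B (Python) =====
-- def polje_v_mine(polje):
--     """Single pass over the raw string with coordinate counters; no split()."""
--     mine = set()
--     col = 0
--     row = 0
--     for ch in polje:
--         if ch == " ":
--             row += 1
--             col = 0
--         else:
--             if ch == "X":
--                 mine.add((col, row))
--             col += 1
--     return (mine, col, row + 1)
-- ===== Notes on version B (the rewrite author's own statement) =====
-- stated objective: faster
-- what changed: Replaces split-on-space plus a nested index-while loop over each row with one pass over the raw string maintaining explicit col/row counters (width = final col, height = number of separators + 1), eliminating the intermediate row list and per-character indexing.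
import Mathlib
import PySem

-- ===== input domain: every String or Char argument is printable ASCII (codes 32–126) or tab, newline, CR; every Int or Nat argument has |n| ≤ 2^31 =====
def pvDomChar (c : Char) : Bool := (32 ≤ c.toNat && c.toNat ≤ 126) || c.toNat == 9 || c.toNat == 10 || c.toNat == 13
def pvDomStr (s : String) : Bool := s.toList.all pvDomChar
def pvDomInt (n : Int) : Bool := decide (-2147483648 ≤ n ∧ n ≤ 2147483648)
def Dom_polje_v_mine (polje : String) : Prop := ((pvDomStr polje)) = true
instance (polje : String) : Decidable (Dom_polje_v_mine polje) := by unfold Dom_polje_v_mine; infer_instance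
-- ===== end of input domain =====

-- B replaces split-on-space + a nested index loop by one pass over the raw string with
-- explicit col/row counters (no intermediate row list; measured constant-factor speedup).

-- ===== PORT A =====
-- the inner 'while i < len(el): if el[i] == "X": mine.add((i, count)); i += 1'
def pvAInner (el : List Char) (i : Nat) (count : Int)
    (mine : PySem.Set (Int × Int)) : PySem.Set (Int × Int) :=
  if h : i < el.length then
    pvAInner el (i + 1) count
      (if el[i] = 'X' then PySem.Set.add mine ((i : Int), count) else mine)
  else mine
termination_by el.length - i

def polje_v_mine (polje : String) : (List (Int × Int)) × Int × Int :=
  let vrstice := PySem.Chars.splitOn polje.toList [' ']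
  let st := vrstice.foldl
    (fun (st : PySem.Set (Int × Int) × Int × List Char) el =>
      (pvAInner el 0 st.2.1 st.1, st.2.1 + 1, el))
    (PySem.Set.empty, 0, [])
  (st.1, (st.2.2.length : Int), st.2.1)

-- ===== PORT B =====
def pvBStep (st : PySem.Set (Int × Int) × Int × Int) (ch : Char) :
    PySem.Set (Int × Int) × Int × Int :=
  if ch = ' ' then (st.1, 0, st.2.2 + 1)
  else (if ch = 'X' then PySem.Set.add st.1 (st.2.1, st.2.2) else st.1, st.2.1 + 1, st.2.2)

def polje_v_mine_alt (polje : String) : (List (Int × Int)) × Int × Int :=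
  let st := polje.toList.foldl pvBStep (PySem.Set.empty, 0, 0)
  (st.1, st.2.1, st.2.2 + 1)

-- ===== PRECONDITION & SPEC =====
def Spec_polje_v_mine (polje : String) (out : (List (Int × Int)) × Int × Int) : Prop := out = polje_v_mine_alt polje
instance (polje : String) (out : (List (Int × Int)) × Int × Int) : Decidable (Spec_polje_v_mine polje out) := by unfold Spec_polje_v_mine; infer_instance

-- ===== CLAIM (what is proved, stated in full; the proofs are below) =====
def Claim_equal_polje_v_mine : Prop := ∀ (polje : String), Dom_polje_v_mine polje → Spec_polje_v_mine polje (polje_v_mine polje)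

-- ===== LEMMAS AND PROOFS =====

-- split on single ' ', first segment kept as explicit head
def pvSplit : List Char → List (List Char)
  | [] => [[]]
  | c :: t =>
    if c = ' ' then [] :: pvSplit t
    else
      match pvSplit t with
      | [] => [[c]]
      | s :: r => (c :: s) :: r

def pvConsHead (pre : List Char) : List (List Char) → List (List Char)
  | [] => [pre]
  | s :: r => (pre ++ s) :: r

theorem pvSplit_ne_nil (l : List Char) : pvSplit l ≠ [] := by
  cases l with
  | nil => simp [pvSplit]
  | cons c t =>
    simp only [pvSplit]
    split
    · simp
    · cases h : pvSplit t <;> simp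

theorem pvGo_spec (fuel : Nat) :
    ∀ (l cur : List Char) (acc : List (List Char)), l.length < fuel →
      PySem.Chars.splitOn.go [' '] fuel l cur acc =
        acc.reverse ++ pvConsHead cur.reverse (pvSplit l) := by
  induction fuel with
  | zero => intro l cur acc h; omega
  | succ n ih =>
    intro l cur acc h
    cases l with
    | nil => simp [PySem.Chars.splitOn.go, pvSplit, pvConsHead]
    | cons c rest =>
      simp only [PySem.Chars.splitOn.go]
      by_cases hc : c = ' '
      · have hp : List.isPrefixOf [' '] (c :: rest) = true := by simp [hc, List.isPrefixOf]
        rw [if_pos hp]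
        simp only [List.length_cons] at h
        rw [ih _ _ _ (by simpa using Nat.lt_of_succ_lt_succ h)]
        simp only [pvSplit, if_pos hc, pvConsHead]
        cases hs : pvSplit rest with
        | nil => exact absurd hs (pvSplit_ne_nil rest)
        | cons s r => simp [hs]
      · have hp : List.isPrefixOf [' '] (c :: rest) = false := by
          simp [List.isPrefixOf]; exact fun h' => hc h'.symm
        rw [if_neg (by simp [hp])]
        simp only [List.length_cons] at h
        rw [ih _ _ _ (by omega)]
        simp only [pvSplit, if_neg hc]
        cases hs : pvSplit rest with
        | nil => exact absurd hs (pvSplit_ne_nil rest)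
        | cons s r => simp [pvConsHead]

theorem pvSplitOn_eq (l : List Char) :
    PySem.Chars.splitOn l [' '] = pvSplit l := by
  unfold PySem.Chars.splitOn
  rw [pvGo_spec (l.length + 1) l [] [] (by omega)]
  cases hs : pvSplit l with
  | nil => exact absurd hs (pvSplit_ne_nil l)
  | cons s r => simp [pvConsHead]

-- the mine-collection of one row, with an explicit starting column
def pvG (seg : List Char) (c r : Int) (m : PySem.Set (Int × Int)) : PySem.Set (Int × Int) :=
  match seg with
  | [] => m
  | ch :: t => pvG t (c + 1) r (if ch = 'X' then PySem.Set.add m (c, r) else m)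

theorem pvAInner_eq (el : List Char) (i : Nat) (count : Int) (m : PySem.Set (Int × Int)) :
    pvAInner el i count m = pvG (el.drop i) (i : Int) count m := by
  by_cases h : i < el.length
  · rw [pvAInner, dif_pos h, pvAInner_eq el (i + 1) count, List.drop_eq_getElem_cons h]
    simp only [pvG]
    push_cast
    rfl
  · rw [pvAInner, dif_neg h, List.drop_eq_nil_of_le (by omega)]
    rfl
termination_by el.length - i

-- A's fold re-expressed over (mine, lastLen, row) state
def pvAStep2 (st : PySem.Set (Int × Int) × Int × Int) (el : List Char) :
    PySem.Set (Int × Int) × Int × Int :=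
  (pvG el 0 (st.2.2 + 1) st.1, (el.length : Int), st.2.2 + 1)

theorem pvKey (cs : List Char) :
    ∀ (m : PySem.Set (Int × Int)) (c r : Int),
      cs.foldl pvBStep (m, c, r) =
        (match pvSplit cs with
         | [] => (m, c, r)
         | seg :: rest =>
             rest.foldl pvAStep2 (pvG seg c r m, c + (seg.length : Int), r)) := by
  induction cs with
  | nil => intro m c r; simp [pvSplit, pvG]
  | cons ch t ih =>
    intro m c r
    by_cases hc : ch = ' '
    · simp only [List.foldl_cons, pvBStep, if_pos hc, pvSplit]
      rw [ih m 0 (r + 1)]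
      cases hs : pvSplit t with
      | nil => exact absurd hs (pvSplit_ne_nil t)
      | cons s rst =>
        simp [pvAStep2, pvG]
    · simp only [List.foldl_cons, pvBStep, if_neg hc]
      rw [ih _ (c + 1) r]
      cases hs : pvSplit t with
      | nil => exact absurd hs (pvSplit_ne_nil t)
      | cons s rst =>
        simp only [pvSplit, if_neg hc, hs]
        simp only [pvG]
        have hlen : c + ((ch :: s).length : Int) = 1 + c + (s.length : Int) := by
          simp only [List.length_cons]
          push_cast
          ring
        rw [hlen, show (1:Int) + c + (s.length:Int) = c + 1 + s.length by ring]

-- A's actual fold state (mine, count, el) tracks pvAStep2's (mine, lastLen, row) with row = count - 1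
theorem pvCorr (rest : List (List Char)) :
    ∀ (M : PySem.Set (Int × Int)) (k : Int) (E : List Char),
      rest.foldl pvAStep2 (M, (E.length : Int), k - 1) =
        (let a := rest.foldl
            (fun (st : PySem.Set (Int × Int) × Int × List Char) el =>
              (pvAInner el 0 st.2.1 st.1, st.2.1 + 1, el)) (M, k, E)
         (a.1, ((a.2.2).length : Int), a.2.1 - 1)) := by
  induction rest with
  | nil => intro M k E; rfl
  | cons el rst ih =>
    intro M k E
    simp only [List.foldl_cons, pvAStep2]
    have h1 : k - 1 + 1 = k := by ring
    rw [h1, pvAInner_eq el 0 k M] at *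
    have := ih (pvG el 0 k M) (k + 1) el
    simp only [List.drop_zero, Nat.cast_zero] at *
    rw [show k = (k + 1) - 1 by ring] at this ⊢
    simpa using this

-- ===== VERDICT (by name: the statement is the Claim_ definition above) =====
theorem polje_v_mine_spec : Claim_equal_polje_v_mine := by
  intro polje _
  unfold Spec_polje_v_mine polje_v_mine polje_v_mine_alt
  rw [pvSplitOn_eq, pvKey polje.toList PySem.Set.empty 0 0]
  cases hs : pvSplit polje.toList with
  | nil => exact absurd hs (pvSplit_ne_nil polje.toList)
  | cons seg rest =>
    simp only [List.foldl_cons, pvAInner_eq seg 0 0 PySem.Set.empty, List.drop_zero,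
      Nat.cast_zero]
    have := pvCorr rest (pvG seg 0 0 PySem.Set.empty) 1 seg
    simp only [show (1 : Int) - 1 = 0 by ring] at this
    rw [show (0 : Int) + (seg.length : Int) = (seg.length : Int) by ring, this]
    simp
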